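-- pv_equiv track=rewrite | github.com/code-study-classes/python-basics-wleha1 | practice_package/loops.py | find_fibonacci_index
-- ===== SOURCE A (Python) =====
-- def find_fibonacci_index(number):
--     a, b, index = 1, 1, 2
--     if number == 1:
--         return 1
--     while b < number:
--         a, b = b, a + b
--         index += 1
--     return index if b == number else -1
-- ===== SOURCE B (Python) =====
-- def find_fibonacci_index(number):
--     if number == 1:
--         return 1
--     if number < 1:
--         return -1
--
--     def fib(k):
--         # fast doubling: (F(k), F(k+1)) with F(0)=0, F(1)=1
--         def pair(k):
--             if k == 0:
--                 return (0, 1)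
--             f, g = pair(k // 2)
--             c = f * (2 * g - f)
--             d = f * f + g * g
--             if k % 2 == 0:
--                 return (c, d)
--             return (d, c + d)
--         return pair(k)[0]
--
--     # exponential search for an index with fib(hi) >= number
--     hi = 2
--     while fib(hi) < number:
--         hi *= 2
--     # binary search for the least index lo >= 2 with fib(lo) >= number
--     lo = 2
--     while lo < hi:
--         mid = (lo + hi) // 2
--         if fib(mid) < number:
--             lo = mid + 1
--         else:
--             hi = mid
--     return lo if fib(lo) == number else -1
-- ===== Notes on version B (the rewrite author's own statement) =====
-- stated objective: alternative
-- what changed: B replaces A's linear two-variable Fibonacci scan by an index search: fib(k) is computed on demand by recursive fast doubling, an exponential search finds an upper index, and a binary search over indices locates the least k with fib(k) >= number, returned iff fib(k) == number.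
import Mathlib
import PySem

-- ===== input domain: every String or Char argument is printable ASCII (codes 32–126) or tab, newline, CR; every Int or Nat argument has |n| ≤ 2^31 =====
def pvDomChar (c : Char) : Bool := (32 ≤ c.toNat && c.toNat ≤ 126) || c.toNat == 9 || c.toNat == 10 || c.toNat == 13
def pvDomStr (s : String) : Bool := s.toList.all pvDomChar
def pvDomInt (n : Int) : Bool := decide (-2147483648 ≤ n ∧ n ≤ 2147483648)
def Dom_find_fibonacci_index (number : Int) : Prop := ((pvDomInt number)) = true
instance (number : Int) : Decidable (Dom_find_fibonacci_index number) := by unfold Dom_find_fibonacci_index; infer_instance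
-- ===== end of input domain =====

-- B answers by binary search over Fibonacci indices with fast-doubling fib(k) evaluation,
-- instead of A's linear two-variable scan; alternative algorithm, same result.

-- ===== PORT A =====
-- A's while-loop; fuel is a totality guard only, never reached on Dom (b grows each step).
def fibLoopA (fuel : Nat) (number a b index : Int) : Int :=
  match fuel with
  | 0 => -1  -- never reached on Dom (see proof)
  | fuel + 1 =>
    if b < number then fibLoopA fuel number b (a + b) (index + 1)
    else if b == number then index else -1

def find_fibonacci_index (number : Int) : Int :=
  -- a, b, index = 1, 1, 2
  if number == 1 then 1
  else fibLoopA 2147483650 number 1 1 2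

-- ===== PORT B =====
-- B's recursive fast-doubling pair(k) = (F(k), F(k+1)); indices are nonnegative
-- throughout B, so they are carried as Nat (Python // and % agree with Nat / and % there).
def fibPair (k : Nat) : Int × Int :=
  match k with
  | 0 => (0, 1)
  | k + 1 =>
    let p := fibPair ((k + 1) / 2)
    let f := p.1
    let g := p.2
    let c := f * (2 * g - f)
    let d := f * f + g * g
    if (k + 1) % 2 == 0 then (c, d) else (d, c + d)
decreasing_by exact Nat.div_lt_self (Nat.succ_pos k) (by omega)

def fibB (k : Nat) : Int := (fibPair k).1

-- the exponential-search loop 'while fib(hi) < number: hi *= 2'; fuel is a totality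
-- guard only, never reached on Dom (fib(64) already exceeds 2^31).
def findHiB (fuel : Nat) (number : Int) (hi : Nat) : Nat :=
  match fuel with
  | 0 => hi  -- never reached on Dom (see proof)
  | fuel + 1 => if fibB hi < number then findHiB fuel number (hi * 2) else hi

-- the binary-search loop 'while lo < hi: …'
def bsearchB (number : Int) (lo hi : Nat) : Nat :=
  if lo < hi then
    let mid := (lo + hi) / 2
    if fibB mid < number then bsearchB number (mid + 1) hi
    else bsearchB number lo mid
  else lo
termination_by hi - lo
decreasing_by all_goals omega

def find_fibonacci_index_alt (number : Int) : Int :=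
  if number == 1 then 1
  else if number < 1 then -1
  else
    let hi := findHiB 100 number 2
    let lo := bsearchB number 2 hi
    if fibB lo == number then (lo : Int) else -1

-- ===== PRECONDITION & SPEC =====
def Spec_find_fibonacci_index (number : Int) (out : Int) : Prop := out = find_fibonacci_index_alt number
instance (number : Int) (out : Int) : Decidable (Spec_find_fibonacci_index number out) := by unfold Spec_find_fibonacci_index; infer_instance

-- ===== CLAIM (what is proved, stated in full; the proofs are below) =====
def Claim_equal_find_fibonacci_index : Prop := ∀ (number : Int), Dom_find_fibonacci_index number → Spec_find_fibonacci_index number (find_fibonacci_index number)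

-- ===== LEMMAS AND PROOFS =====

-- the mathematical Fibonacci numbers, as integers
def fibI (n : Nat) : Int := (Nat.fib n : Int)

theorem fibPair_eq (k : Nat) : fibPair k = (fibI k, fibI (k + 1)) := by
  induction k using Nat.strong_induction_on with
  | _ k ih =>
    match k with
    | 0 => simp [fibPair, fibI]
    | m + 1 =>
      rw [fibPair]
      have hdiv : (m + 1) / 2 < m + 1 := Nat.div_lt_self (Nat.succ_pos m) (by omega)
      rw [ih _ hdiv]
      set q := (m + 1) / 2 with hq
      have hmono : Nat.fib q ≤ 2 * Nat.fib (q + 1) := by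
        have h := Nat.fib_mono (show q ≤ q + 1 by omega); omega
      have h2q : fibI q * (2 * fibI (q + 1) - fibI q) = fibI (2 * q) := by
        unfold fibI
        rw [Nat.fib_two_mul, Nat.cast_mul, Nat.cast_sub hmono]
        push_cast
        ring
      have h2q1 : fibI q * fibI q + fibI (q + 1) * fibI (q + 1) = fibI (2 * q + 1) := by
        unfold fibI
        rw [Nat.fib_two_mul_add_one]
        push_cast
        ring
      rcases Nat.even_or_odd (m + 1) with he | ho
      · obtain ⟨t, ht⟩ := he
        have hqt : q = t := by omega
        have hm2 : (m + 1) % 2 = 0 := by omega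
        simp only [hm2, beq_self_eq_true, if_pos]
        subst hqt
        have h1 : m + 1 = 2 * q := by omega
        rw [h1, h2q, h2q1]
      · obtain ⟨t, ht⟩ := ho
        have hqt : q = t := by omega
        have hm2 : (m + 1) % 2 = 1 := by omega
        simp only [hm2]
        norm_num
        subst hqt
        have h1 : m + 1 = 2 * q + 1 := by omega
        rw [h1, h2q, h2q1]
        constructor
        · rfl
        · show fibI (2 * q) + fibI (2 * q + 1) = fibI (2 * q + 1 + 1)
          unfold fibI
          rw [Nat.fib_add_two]
          push_cast
          ring

theorem fibB_eq (k : Nat) : fibB k = fibI k := by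
  unfold fibB; rw [fibPair_eq]

-- the least-index region: r is the least index ≥ 2 with number ≤ fib r
theorem fibI_mono {a b : Nat} (h : a ≤ b) : fibI a ≤ fibI b := by
  unfold fibI; exact_mod_cast Nat.fib_mono h

-- A's loop computes (if fibI r = number then r else -1) for the least such r
theorem loopA_eq (number : Int) (r : Nat) (hr2 : 2 ≤ r) (hge : number ≤ fibI r)
    (hlt : ∀ j, 2 ≤ j → j < r → fibI j < number) :
    ∀ (fuel j : Nat), j + 2 ≤ r → r < j + 2 + fuel →
      fibLoopA fuel number (fibI (j + 1)) (fibI (j + 2)) ((j : Int) + 2) =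
        if fibI r = number then (r : Int) else -1 := by
  intro fuel
  induction fuel with
  | zero => intro j h1 h2; omega
  | succ fuel ih =>
    intro j h1 h2
    rw [fibLoopA]
    by_cases hb : fibI (j + 2) < number
    · simp only [hb, if_pos]
      have hjr : j + 2 < r := by
        rcases Nat.lt_or_ge (j + 2) r with h | h
        · exact h
        · have : r ≤ j + 2 := h
          have := fibI_mono this
          omega
      have hrec : fibI (j + 1) + fibI (j + 2) = fibI (j + 3) := by
        unfold fibI
        have h : Nat.fib (j + 1) + Nat.fib (j + 2) = Nat.fib (j + 3) :=
          (Nat.fib_add_two).symm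
        exact_mod_cast h
      have := ih (j + 1) (by omega) (by omega)
      rw [hrec]
      have hcast : ((j : Int) + 2) + 1 = ((j + 1 : Nat) : Int) + 2 := by push_cast; ring
      rw [hcast]
      exact this
    · simp only [hb, if_neg, if_false]
      have hjr : j + 2 = r := by
        rcases Nat.lt_or_ge (j + 2) r with h | h
        · have := hlt (j + 2) (by omega) h; omega
        · omega
      by_cases heq : fibI r = number
      · have h1 : (fibI (j + 2) == number) = true := by rw [hjr]; simp [heq]
        rw [h1]
        simp only [if_pos, heq, if_true]
        rw [← hjr]; push_cast; ring
      · have h1 : (fibI (j + 2) == number) = false := by rw [hjr]; simp [heq]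
        rw [h1]
        simp [heq]

-- the exponential search returns an index hi with number ≤ fib hi
theorem findHi_spec (number : Int) :
    ∀ (fuel hi : Nat), 2 ≤ hi → number ≤ fibI (hi * 2 ^ fuel) →
      2 ≤ findHiB fuel number hi ∧ number ≤ fibI (findHiB fuel number hi) := by
  intro fuel
  induction fuel with
  | zero =>
    intro hi h2 hle
    simp only [pow_zero, Nat.mul_one] at hle
    exact ⟨h2, by simpa [findHiB] using hle⟩
  | succ fuel ih =>
    intro hi h2 hle
    rw [findHiB]
    by_cases hb : fibB hi < number
    · simp only [hb, if_pos]
      exact ih (hi * 2) (by omega) (by rw [show hi * 2 * 2 ^ fuel = hi * 2 ^ (fuel + 1) by ring]; exact hle)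
    · simp only [hb, if_neg, if_false]
      rw [fibB_eq] at hb
      exact ⟨h2, by omega⟩

-- the binary search narrows [lo, hi] onto the least index r
theorem bsearch_eq (number : Int) (r : Nat) (hge : number ≤ fibI r)
    (hlt : ∀ j, 2 ≤ j → j < r → fibI j < number) :
    ∀ (d lo hi : Nat), hi - lo ≤ d → 2 ≤ lo → lo ≤ r → r ≤ hi →
      bsearchB number lo hi = r := by
  intro d
  induction d with
  | zero =>
    intro lo hi hd h2 hlo hhi
    rw [bsearchB]
    have : ¬ lo < hi := by omega
    simp only [this, if_neg, if_false]
    omega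
  | succ d ih =>
    intro lo hi hd h2 hlo hhi
    rw [bsearchB]
    by_cases hlh : lo < hi
    · simp only [hlh, if_pos]
      set mid := (lo + hi) / 2 with hmid
      have hmb : lo ≤ mid ∧ mid < hi := by constructor <;> omega
      by_cases hb : fibB mid < number
      · simp only [hb, if_pos]
        rw [fibB_eq] at hb
        have hmr : mid < r := by
          rcases Nat.lt_or_ge mid r with h | h
          · exact h
          · have := fibI_mono h; omega
        exact ih (mid + 1) hi (by omega) (by omega) (by omega) hhi
      · simp only [hb, if_neg, if_false]
        rw [fibB_eq] at hb
        have hrm : r ≤ mid := by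
          rcases Nat.lt_or_ge mid r with h | h
          · have := hlt mid (by omega) h; omega
          · omega
        exact ih lo mid (by omega) h2 hlo hrm
    · simp only [hlh, if_neg, if_false]
      omega

theorem fib47_val : fibI 47 = 2971215073 := by decide

-- ===== VERDICT (by name: the statement is the Claim_ definition above) =====
theorem find_fibonacci_index_spec : Claim_equal_find_fibonacci_index := by
  intro number hdom
  unfold Spec_find_fibonacci_index find_fibonacci_index find_fibonacci_index_alt
  have hdom' : -2147483648 ≤ number ∧ number ≤ 2147483648 := by
    simpa [Dom_find_fibonacci_index, pvDomInt] using hdom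
  by_cases h1 : number = 1
  · subst h1; decide
  · have hne : (number == 1) = false := by simp [h1]
    rw [hne]
    simp only [Bool.false_eq_true, if_false]
    by_cases hsmall : number < 1
    · -- number ≤ 0: A's loop exits immediately with b = 1 ≠ number
      simp only [if_pos hsmall]
      rw [fibLoopA]
      have hb : ¬ (1 : Int) < number := by omega
      simp only [hb, if_neg, if_false]
      have h1' : ((1 : Int) == number) = false := by simp; omega
      rw [h1']
      simp
    · -- number ≥ 2: both sides compute the least r ≥ 2 with number ≤ fib r
      simp only [if_neg hsmall]
      have hn2 : 2 ≤ number := by omega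
      -- the least index r
      have hP : ∃ k, 2 ≤ k ∧ number ≤ fibI k :=
        ⟨47, by omega, by rw [fib47_val]; omega⟩
      classical
      let r := Nat.find hP
      have hrspec : 2 ≤ r ∧ number ≤ fibI r := Nat.find_spec hP
      have hrlt : ∀ j, 2 ≤ j → j < r → fibI j < number := by
        intro j hj2 hjr
        have := Nat.find_min hP hjr
        push_neg at this
        have := this hj2
        omega
      have hr47 : r ≤ 47 := Nat.find_min' hP ⟨by omega, by rw [fib47_val]; omega⟩
      -- A's side: start state (fib 1, fib 2, 2) = (1, 1, 2)
      have hA : fibLoopA 2147483650 number 1 1 2 = if fibI r = number then (r : Int) else -1 := by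
        have := loopA_eq number r hrspec.1 hrspec.2 hrlt 2147483650 0 (by omega) (by omega)
        simpa [fibI] using this
      -- B's side
      have hHi := findHi_spec number 100 2 (by omega)
        (by
          have h47 : (47 : Nat) ≤ 2 * 2 ^ 100 := by norm_num
          have := fibI_mono h47
          rw [fib47_val] at this
          omega)
      have hrhi : r ≤ findHiB 100 number 2 := by
        rcases Nat.lt_or_ge (findHiB 100 number 2) r with h | h
        · have := hrlt _ hHi.1 h; omega
        · omega
      have hB : bsearchB number 2 (findHiB 100 number 2) = r :=
        bsearch_eq number r hrspec.2 hrlt (findHiB 100 number 2) 2 _ (by omega) (by omega)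
          hrspec.1 hrhi
      rw [hA, hB, fibB_eq]
      by_cases heq : fibI r = number
      · simp [heq]
      · have : (fibI r == number) = false := by simp [heq]
        rw [this]
        simp [heq]
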